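-- pv_equiv track=rewrite | github.com/ilkeminan/ZararliURLVeriSetiOlusturulupOzellikCikarimiYapilmasi | feature_extraction.py | is_ip
-- ===== SOURCE A (Python) =====
-- def is_ip(url):
--     ip = False
--     length = len(url)
--     for i in range(length):
--         count = 0
--         j = i
--         while(j<length and ((ord(url[j])>=48 and ord(url[j])<=57) or ord(url[j])==46)):
--             if(ord(url[j])==46):             #Ascii of the dot
--                 count = count + 1
--             j = j + 1
--         if(count==3):
--             ip = True
--     if(ip == True):
--         return 0
--     else:
--         return 1
--
-- def length(url):
--     if(len(url) > 100):
--         return 0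
--     else:
--         return 1
--
-- ip = []
-- ===== SOURCE B (Python) =====
-- def is_ip(url):
--     # Single left-to-right pass: count dots in the current maximal digit/dot run;
--     # any run accumulating 3 dots means some start position in A sees exactly 3.
--     dots = 0
--     for ch in url:
--         o = ord(ch)
--         if o == 46:
--             dots += 1
--         elif not (48 <= o <= 57):
--             dots = 0
--         if dots >= 3:
--             return 0
--     return 1
-- ===== Notes on version B (the rewrite author's own statement) =====
-- stated objective: faster
-- what changed: Replace the quadratic scan from every start index by a single left-to-right pass that counts dots in the current digit/dot run and flags once a run reaches 3 dots (with early exit).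
import Mathlib
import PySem

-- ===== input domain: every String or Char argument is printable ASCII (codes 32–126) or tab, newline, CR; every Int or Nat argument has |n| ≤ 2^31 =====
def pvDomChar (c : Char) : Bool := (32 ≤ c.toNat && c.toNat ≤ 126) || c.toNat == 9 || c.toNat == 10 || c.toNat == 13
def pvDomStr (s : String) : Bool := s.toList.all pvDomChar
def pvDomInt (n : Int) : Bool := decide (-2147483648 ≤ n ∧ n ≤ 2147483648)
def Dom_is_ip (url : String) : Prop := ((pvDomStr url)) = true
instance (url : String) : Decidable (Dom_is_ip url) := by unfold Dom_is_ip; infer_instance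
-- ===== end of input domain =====

-- B replaces A's scan from every start index by ONE pass counting dots in the
-- current digit/dot run (flag at 3 dots, early exit).

-- ===== PORT A =====
-- inner while loop: starting at suffix `l`, advance while digit or dot, counting dots
def isIpInner (l : List Char) (count : Nat) : Nat :=
  match l with
  | [] => count
  | c :: rest =>
    if (48 ≤ c.toNat ∧ c.toNat ≤ 57) ∨ c.toNat = 46 then
      isIpInner rest (if c.toNat = 46 then count + 1 else count)
    else count

-- outer for loop over all start indices i (i.e. all nonempty suffixes), ip flag
def isIpOuter (l : List Char) : Bool :=
  match l with
  | [] => false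
  | _ :: rest => (isIpInner l 0 == 3) || isIpOuter rest

def is_ip (url : String) : Int :=
  if isIpOuter url.toList then 0 else 1

-- ===== PORT B =====
-- single pass; `dots` = dots counted in the current digit/dot run, early return 0
def isIpLoopB (l : List Char) (dots : Nat) : Int :=
  match l with
  | [] => 1
  | c :: rest =>
    let d := if c.toNat = 46 then dots + 1
             else if 48 ≤ c.toNat ∧ c.toNat ≤ 57 then dots else 0
    if 3 ≤ d then 0 else isIpLoopB rest d

def is_ip_alt (url : String) : Int := isIpLoopB url.toList 0

-- ===== PRECONDITION & SPEC =====
def Spec_is_ip (url : String) (out : Int) : Prop := out = is_ip_alt url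
instance (url : String) (out : Int) : Decidable (Spec_is_ip url out) := by unfold Spec_is_ip; infer_instance

-- ===== CLAIM (what is proved, stated in full; the proofs are below) =====
def Claim_equal_is_ip : Prop := ∀ (url : String), Dom_is_ip url → Spec_is_ip url (is_ip url)

-- ===== LEMMAS AND PROOFS =====

lemma isIpInner_add (l : List Char) (k : Nat) : isIpInner l k = k + isIpInner l 0 := by
  induction l generalizing k with
  | nil => simp [isIpInner]
  | cons c rest ih =>
    by_cases h : (48 ≤ c.toNat ∧ c.toNat ≤ 57) ∨ c.toNat = 46
    · by_cases hd : c.toNat = 46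
      · simp only [isIpInner, if_pos h, if_pos hd]
        rw [ih (k + 1), ih 1]; omega
      · simp only [isIpInner, if_pos h, if_neg hd]
        rw [ih k]
    · simp [isIpInner, if_neg h]

-- dcount l := dots in the maximal leading digit/dot run of l
lemma isIpInner_cons (c : Char) (rest : List Char) :
    isIpInner (c :: rest) 0 =
      if (48 ≤ c.toNat ∧ c.toNat ≤ 57) ∨ c.toNat = 46 then
        (if c.toNat = 46 then 1 else 0) + isIpInner rest 0
      else 0 := by
  by_cases h : (48 ≤ c.toNat ∧ c.toNat ≤ 57) ∨ c.toNat = 46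
  · by_cases hd : c.toNat = 46
    · simp only [isIpInner, if_pos h, if_pos hd, isIpInner_add rest 1]
    · simp only [isIpInner, if_pos h, if_neg hd, Nat.zero_add]
  · simp [isIpInner, if_neg h]

-- if the leading run has ≥ 3 dots, some suffix's leading run has exactly 3 dots
lemma outer_of_dcount_ge (l : List Char) (h : 3 ≤ isIpInner l 0) : isIpOuter l = true := by
  induction l with
  | nil => simp [isIpInner] at h
  | cons c rest ih =>
    by_cases h3 : isIpInner (c :: rest) 0 = 3
    · simp [isIpOuter, h3]
    · have hcons := isIpInner_cons c rest
      have hrest : 3 ≤ isIpInner rest 0 := by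
        by_cases hdd : (48 ≤ c.toNat ∧ c.toNat ≤ 57) ∨ c.toNat = 46
        · rw [hcons, if_pos hdd] at h h3
          split_ifs at h h3 <;> omega
        · rw [hcons, if_neg hdd] at h; omega
      simp [isIpOuter, ih hrest]

-- B with incoming state d (< 3) hits the flag iff A's outer loop fires on l,
-- or the incoming d plus the dots of the leading run reaches 3
lemma loopB_eq (l : List Char) (d : Nat) (hd : d < 3) :
    isIpLoopB l d = (if isIpOuter l = true ∨ 3 ≤ d + isIpInner l 0 then 0 else 1) := by
  induction l generalizing d with
  | nil => simp [isIpLoopB, isIpOuter, isIpInner]; omega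
  | cons c rest ih =>
    have hcons := isIpInner_cons c rest
    by_cases hdot : c.toNat = 46
    · have hdd : (48 ≤ c.toNat ∧ c.toNat ≤ 57) ∨ c.toNat = 46 := Or.inr hdot
      rw [if_pos hdd, if_pos hdot] at hcons
      simp only [isIpLoopB, if_pos hdot]
      by_cases h3 : 3 ≤ d + 1
      · rw [if_pos h3, if_pos]
        right; rw [hcons]; omega
      · rw [if_neg h3, ih (d + 1) (by omega)]
        have : (isIpOuter rest = true ∨ 3 ≤ d + 1 + isIpInner rest 0) ↔
            (isIpOuter (c :: rest) = true ∨ 3 ≤ d + isIpInner (c :: rest) 0) := by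
          constructor
          · rintro (h | h)
            · exact Or.inl (by simp [isIpOuter, h])
            · right; rw [hcons]; omega
          · rintro (h | h)
            · simp only [isIpOuter, Bool.or_eq_true, beq_iff_eq] at h
              rcases h with h | h
              · right; omega
              · exact Or.inl h
            · right; rw [hcons] at h; omega
        split_ifs with h1 h2 h2 <;> first | rfl | (exact absurd (this.mp h1) h2) | (exact absurd (this.mpr h2) h1)
    · by_cases hdig : 48 ≤ c.toNat ∧ c.toNat ≤ 57
      · have hdd : (48 ≤ c.toNat ∧ c.toNat ≤ 57) ∨ c.toNat = 46 := Or.inl hdig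
        rw [if_pos hdd, if_neg hdot] at hcons
        simp only [isIpLoopB, if_neg hdot, if_pos hdig]
        rw [if_neg (by omega), ih d hd]
        have : (isIpOuter rest = true ∨ 3 ≤ d + isIpInner rest 0) ↔
            (isIpOuter (c :: rest) = true ∨ 3 ≤ d + isIpInner (c :: rest) 0) := by
          constructor
          · rintro (h | h)
            · exact Or.inl (by simp [isIpOuter, h])
            · right; rw [hcons]; omega
          · rintro (h | h)
            · simp only [isIpOuter, Bool.or_eq_true, beq_iff_eq] at h
              rcases h with h | h
              · right; rw [hcons] at h; omega
              · exact Or.inl h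
            · right; rw [hcons] at h; omega
        split_ifs with h1 h2 h2 <;> first | rfl | (exact absurd (this.mp h1) h2) | (exact absurd (this.mpr h2) h1)
      · have hdd : ¬ ((48 ≤ c.toNat ∧ c.toNat ≤ 57) ∨ c.toNat = 46) := by tauto
        rw [if_neg hdd] at hcons
        simp only [isIpLoopB, if_neg hdot, if_neg hdig]
        rw [if_neg (by omega), ih 0 (by omega)]
        have : (isIpOuter rest = true ∨ 3 ≤ 0 + isIpInner rest 0) ↔
            (isIpOuter (c :: rest) = true ∨ 3 ≤ d + isIpInner (c :: rest) 0) := by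
          constructor
          · rintro (h | h)
            · exact Or.inl (by simp [isIpOuter, h])
            · exact Or.inl (by simp [isIpOuter, outer_of_dcount_ge rest (by omega)])
          · rintro (h | h)
            · simp only [isIpOuter, Bool.or_eq_true, beq_iff_eq] at h
              rcases h with h | h
              · rw [hcons] at h; omega
              · exact Or.inl h
            · rw [hcons] at h; omega
        split_ifs with h1 h2 h2 <;> first | rfl | (exact absurd (this.mp h1) h2) | (exact absurd (this.mpr h2) h1)

-- ===== VERDICT (by name: the statement is the Claim_ definition above) =====
theorem is_ip_spec : Claim_equal_is_ip := by
  intro url _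
  unfold Spec_is_ip is_ip is_ip_alt
  rw [loopB_eq url.toList 0 (by omega)]
  by_cases h : isIpOuter url.toList = true
  · rw [if_pos h, if_pos (Or.inl h)]
  · rw [if_neg h, if_neg]
    rintro (h1 | h1)
    · exact h h1
    · exact h (outer_of_dcount_ge _ (by omega))
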